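-- pv_equiv track=rewrite | github.com/ZeVicTech/AlgorithmProblems | 힙/더_맵게.py | solution
-- ===== SOURCE A (Python) =====
-- import heapq
--
-- def solution(scoville, K):
--
--     heap = scoville[:]
--     heapq.heapify(heap)
--     cnt = 0
--
--     while heap[0] < K:
--         if len(heap) == 1:
--             return -1
--         food1 = heapq.heappop(heap)
--         food2 = heapq.heappop(heap)
--
--         food = food1 + 2*food2
--
--         heapq.heappush(heap,food)
--         cnt += 1
--
--     return cnt
-- ===== SOURCE B (Python) =====
-- import bisect
--
-- def solution(scoville, K):
--     s = sorted(scoville)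
--     i = 0                       # index of the smallest remaining element
--     cnt = 0
--     while s[i] < K:
--         if len(s) - i == 1:
--             return -1
--         food = s[i] + 2 * s[i + 1]
--         i += 2                  # consume the two smallest
--         bisect.insort(s, food, lo=i)
--         cnt += 1
--     return cnt
-- ===== Notes on version B (the rewrite author's own statement) =====
-- stated objective: alternative
-- what changed: Replaces A's binary min-heap (heapq heapify/heappop/heappush) with a fully sorted list plus a front index, reading the two smallest elements at the front and re-inserting the merged value in sorted position with bisect.insort instead of heap pops and pushes.
import Mathlib
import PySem

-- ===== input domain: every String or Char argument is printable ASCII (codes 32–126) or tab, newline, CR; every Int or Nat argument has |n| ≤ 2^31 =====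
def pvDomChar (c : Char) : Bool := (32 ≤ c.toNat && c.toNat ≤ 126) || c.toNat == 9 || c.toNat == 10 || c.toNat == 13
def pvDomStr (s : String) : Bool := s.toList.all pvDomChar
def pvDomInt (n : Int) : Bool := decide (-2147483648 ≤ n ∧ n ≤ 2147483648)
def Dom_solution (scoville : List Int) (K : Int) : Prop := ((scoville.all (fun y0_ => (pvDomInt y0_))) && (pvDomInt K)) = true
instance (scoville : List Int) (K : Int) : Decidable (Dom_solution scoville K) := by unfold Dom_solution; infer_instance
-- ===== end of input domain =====

-- B replaces A's binary heap with a fully sorted list maintained by binary insertion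
-- (bisect.insort): same return value, a different container-maintenance strategy.

-- ===== PORT A =====
-- heapq is a standard-library call; it is ported by its value-level semantics on a list of
-- ints: heap[0] and heappop yield the minimum of the current elements (ints are compared by
-- value, so which of several equal elements is popped is unobservable), heappush adds the
-- element, heapify only rearranges (no effect on the multiset of values, hence none on the
-- popped values). This is exact for the return value on every input.
def heapMin (x : Int) (xs : List Int) : Int := xs.foldl min x

theorem heapMin_cons (x y : Int) (ys : List Int) :
    heapMin x (y :: ys) = heapMin (min x y) ys := rfl

theorem heapMin_mem (x : Int) (xs : List Int) : heapMin x xs ∈ x :: xs := by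
  induction xs generalizing x with
  | nil => simp [heapMin]
  | cons y ys ih =>
    rw [heapMin_cons]
    rcases List.mem_cons.mp (ih (min x y)) with h | h
    · rcases min_choice x y with hm | hm
      · exact List.mem_cons.mpr (Or.inl (h.trans hm))
      · exact List.mem_cons.mpr (Or.inr (List.mem_cons.mpr (Or.inl (h.trans hm))))
    · exact List.mem_cons.mpr (Or.inr (List.mem_cons.mpr (Or.inr h)))

-- heappop: return the minimum and the remaining elements ((0, []) is never used: the pops
-- in A happen only on heaps of length ≥ 2 resp. ≥ 1).
def popMin : List Int → Int × List Int
  | [] => (0, [])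
  | x :: xs =>
    let m := heapMin x xs
    (m, (x :: xs).erase m)

theorem popMin_length (l : List Int) (h : l ≠ []) : (popMin l).2.length + 1 = l.length := by
  match l with
  | [] => exact absurd rfl h
  | x :: xs =>
    simp only [popMin]
    rw [List.length_erase_of_mem (heapMin_mem x xs)]
    simp

def solutionLoop (heap : List Int) (K : Int) (cnt : Int) : Int :=
  match heap with
  | [] => -1                 -- unreachable under Pre_: heap[0] raises IndexError on an empty heap
  | x :: xs =>
    if heapMin x xs < K then               -- while heap[0] < K  (the heap root is the minimum)
      if xs = [] then -1                   -- len(heap) == 1: return -1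
      else
        let p1 := popMin (x :: xs)         -- food1 = heapq.heappop(heap)
        let p2 := popMin p1.2              -- food2 = heapq.heappop(heap)
        solutionLoop ((p1.1 + 2 * p2.1) :: p2.2) K (cnt + 1)  -- heappush(heap, food1 + 2*food2)
    else cnt
termination_by heap.length
decreasing_by
  have h1 : (popMin (x :: xs)).2.length + 1 = (x :: xs).length := popMin_length _ (by simp)
  have hne : (popMin (x :: xs)).2 ≠ [] := by
    intro e
    rw [e] at h1
    simp only [List.length_nil, List.length_cons] at h1
    have : xs.length = 0 := by omega
    exact ‹xs ≠ []› (List.length_eq_zero_iff.mp this)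
  have h2 := popMin_length _ hne
  simp only [List.length_cons] at *
  omega

def solution (scoville : List Int) (K : Int) : Int :=
  let heap := scoville          -- heap = scoville[:]; heapq.heapify(heap)
  solutionLoop heap K 0         -- cnt = 0; the while loop

-- ===== PORT B =====
-- B keeps scoville sorted and advances a front index i over consumed elements; the live
-- suffix s[i:] is ported as the list itself: s[i] is the head, len(s)-i == 1 is the tail
-- being empty, i += 2 drops the two head elements, and bisect.insort(s, food, lo=i) — the
-- standard-library sorted insertion into the live suffix — is List.orderedInsert (exact on
-- ints: equal values are indistinguishable).
def solutionAltLoop (s : List Int) (K : Int) (cnt : Int) : Int :=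
  match s with
  | [] => -1                    -- unreachable under Pre_: s[0] raises IndexError
  | x :: xs =>
    if x < K then               -- while s[0] < K
      match xs with
      | [] => -1                -- len(s) - i == 1: return -1
      | y :: ys =>
        -- food = s[i] + 2*s[i+1]; i += 2; bisect.insort(s, food, lo=i)
        solutionAltLoop (List.orderedInsert (· ≤ ·) (x + 2 * y) ys) K (cnt + 1)
    else cnt
termination_by s.length
decreasing_by simp [List.orderedInsert_length]

def solution_alt (scoville : List Int) (K : Int) : Int :=
  solutionAltLoop (PySem.List.sorted scoville (fun v => v) false) K 0

-- ===== PRECONDITION & SPEC =====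
-- Pre_ excludes only the empty list, on which A raises IndexError at heap[0].
def Pre_solution (scoville : List Int) (K : Int) : Prop := scoville ≠ []
instance (scoville : List Int) (K : Int) : Decidable (Pre_solution scoville K) := by
  unfold Pre_solution; infer_instance

def pvWitness_solution : List Int × Int := ([1, 2, 3, 9, 10, 12], 7)

def Spec_solution (scoville : List Int) (K : Int) (out : Int) : Prop := out = solution_alt scoville K
instance (scoville : List Int) (K : Int) (out : Int) : Decidable (Spec_solution scoville K out) := by
  unfold Spec_solution; infer_instance

-- ===== CLAIM (what is proved, stated in full; the proofs are below) =====
def Claim_equal_solution : Prop := ∀ (scoville : List Int) (K : Int), Dom_solution scoville K → Pre_solution scoville K → Spec_solution scoville K (solution scoville K)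

-- ===== LEMMAS AND PROOFS =====

theorem heapMin_le (x : Int) (xs : List Int) : ∀ a ∈ x :: xs, heapMin x xs ≤ a := by
  induction xs generalizing x with
  | nil => simp [heapMin]
  | cons y ys ih =>
    intro a ha
    rw [heapMin_cons]
    have hle : heapMin (min x y) ys ≤ min x y := ih (min x y) (min x y) (by simp)
    rcases List.mem_cons.mp ha with rfl | ha
    · exact le_trans hle (min_le_left _ _)
    · rcases List.mem_cons.mp ha with rfl | ha
      · exact le_trans hle (min_le_right _ _)
      · exact ih (min x y) a (List.mem_cons.mpr (Or.inr ha))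


-- The minimum of a nonempty list is the head of any sorted permutation of it.
theorem heapMin_eq_head (x h : Int) (xs t : List Int)
    (hp : (h :: t).Perm (x :: xs)) (hs : (h :: t).Pairwise (· ≤ ·)) :
    heapMin x xs = h := by
  have hmem : heapMin x xs ∈ h :: t := hp.mem_iff.mpr (heapMin_mem x xs)
  have hmem' : h ∈ x :: xs := hp.mem_iff.mp (List.mem_cons_self)
  have h1 : h ≤ heapMin x xs := by
    rcases List.mem_cons.mp hmem with hm | hm
    · omega
    · exact (List.pairwise_cons.mp hs).1 _ hm
  exact le_antisymm (heapMin_le x xs h hmem') h1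

-- Loop invariant: on any sorted permutation of the heap's contents, B's loop computes
-- what A's loop computes.
theorem loop_eq (n : Nat) : ∀ (heap sl : List Int) (K cnt : Int),
    heap.length ≤ n → sl.Perm heap → sl.Pairwise (· ≤ ·) →
    solutionLoop heap K cnt = solutionAltLoop sl K cnt := by
  induction n with
  | zero =>
    intro heap sl K cnt hn hp _
    have : heap = [] := List.length_eq_zero_iff.mp (by omega)
    subst this
    have : sl = [] := hp.eq_nil
    subst this
    simp [solutionLoop, solutionAltLoop]
  | succ n ih =>
    intro heap sl K cnt hn hp hs
    match heap, sl with
    | [], sl =>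
      have : sl = [] := hp.eq_nil
      subst this
      simp [solutionLoop, solutionAltLoop]
    | x :: xs, [] =>
      exact absurd hp.length_eq (by simp)
    | x :: xs, h :: t =>
      have hm : heapMin x xs = h := heapMin_eq_head x h xs t hp hs
      rw [solutionLoop.eq_def, solutionAltLoop.eq_def]
      simp only [hm]
      by_cases hK : h < K
      · simp only [if_pos hK]
        have hlen : t.length = xs.length := by
          have := hp.length_eq
          simp only [List.length_cons] at this
          omega
        by_cases hxs : xs = []
        · have ht : t = [] := List.length_eq_zero_iff.mp (by rw [hlen, hxs]; rfl)
          subst hxs; subst ht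
          simp
        · simp only [if_neg hxs]
          -- t is nonempty since it has xs's length
          have htne : t ≠ [] := fun e => hxs (List.length_eq_zero_iff.mp (by rw [← hlen, e]; rfl))
          obtain ⟨y, ys, hty⟩ := List.exists_cons_of_ne_nil htne
          subst hty
          -- first pop: popMin (x :: xs) = (h, rest) with rest ~ y :: ys
          have hp1 : ((x :: xs).erase h).Perm (y :: ys) := by
            have := (hp.erase h)
            simpa [List.erase_cons_head] using this.symm
          have hs_t : (y :: ys).Pairwise (· ≤ ·) := (List.pairwise_cons.mp hs).2
          have hne1 : (x :: xs).erase h ≠ [] := by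
            intro e
            have := hp1.length_eq
            rw [e] at this
            simp at this
          obtain ⟨a, as, h1eq⟩ := List.exists_cons_of_ne_nil hne1
          rw [h1eq] at hp1
          -- second pop: the min of the rest is y, the head of the sorted tail
          have hm2 : heapMin a as = y := heapMin_eq_head a y as ys hp1.symm hs_t
          have hp2 : ((a :: as).erase y).Perm ys := by
            have := hp1.erase y
            simpa [List.erase_cons_head] using this
          simp only [popMin, hm, hm2, h1eq]
          apply ih
          · have l2 : ((a :: as).erase y).length + 1 = (a :: as).length := by
              rw [← hm2]; exact popMin_length (a :: as) (by simp)
            have l1 : (a :: as).length + 1 = (x :: xs).length := by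
              rw [← h1eq, ← hm]; exact popMin_length (x :: xs) (by simp)
            simp only [List.length_cons] at *
            omega
          · exact (List.perm_orderedInsert _ _ _).trans (hp2.symm.cons _)
          · exact List.Pairwise.orderedInsert _ _ (List.pairwise_cons.mp hs_t).2
      · simp [if_neg hK]

-- ===== VERDICT (by name: the statement is the Claim_ definition above) =====
theorem solution_spec : Claim_equal_solution := by
  intro scoville K _ _
  unfold Spec_solution solution solution_alt
  exact loop_eq scoville.length scoville _ K 0 le_rfl
    (PySem.List.sorted_perm scoville (fun v => v) false)
    (by simpa using PySem.List.sorted_pairwise scoville (fun v => v))
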